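-- pv_equiv track=rewrite | github.com/AnthonyFavier/collaborative-constraint-planning | llm_NL_decomposition.py | removeFormating
-- ===== SOURCE A (Python) =====
-- def removeFormating(text):
--
--     # Remove initial white spaces and empty lines
--     newtext = ""
--     for l in text.splitlines():
--         if l=='':
--             continue
--         i = 0
--         while i<len(l) and l[i]==' ':
--             i+=1
--         l = l[i:]
--         newtext += l + '\n'
--
--
--     # Get main items
--     main_items = []
--     for l in newtext.splitlines():
--         try:
--             int(l[0])
--             main_items.append(l)
--         except:
--             continue
--
--     symbols = [
--         '#',
--         '*',
--         '=',
--         '-',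
--     ]
--
--     newtext = ""
--     for l in main_items:
--         for s in symbols:
--             l = l.replace(s, '')
--         i = 0
--         while not l[i].isalpha():
--             i+=1
--         l = l[i:]
--         newtext += l + '\n'
--     newtext = newtext[:-1]
--
--     return newtext
-- ===== SOURCE B (Python) =====
-- def removeFormating(text):
--     # One fused pass over the lines instead of A's three passes and string rebuilds.
--     out = []
--     for raw in text.splitlines():
--         l = raw.lstrip(' ')
--         if not l or not l[0].isdigit():
--             continue
--         l = ''.join(c for c in l if c not in '#*=-')
--         for k, c in enumerate(l):
--             if c.isalpha():
--                 out.append(l[k:])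
--                 break
--     return '\n'.join(out)
-- ===== Notes on version B (the rewrite author's own statement) =====
-- stated objective: simpler
-- what changed: A's three sequential passes (strip-and-rebuild text, re-split and pick digit-led lines, strip symbols/prefix and rebuild again) are fused into a single loop over the original lines that emits each cleaned line once, joined at the end; manual index loops are replaced by lstrip/str.join/a generator filter.
import Mathlib
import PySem

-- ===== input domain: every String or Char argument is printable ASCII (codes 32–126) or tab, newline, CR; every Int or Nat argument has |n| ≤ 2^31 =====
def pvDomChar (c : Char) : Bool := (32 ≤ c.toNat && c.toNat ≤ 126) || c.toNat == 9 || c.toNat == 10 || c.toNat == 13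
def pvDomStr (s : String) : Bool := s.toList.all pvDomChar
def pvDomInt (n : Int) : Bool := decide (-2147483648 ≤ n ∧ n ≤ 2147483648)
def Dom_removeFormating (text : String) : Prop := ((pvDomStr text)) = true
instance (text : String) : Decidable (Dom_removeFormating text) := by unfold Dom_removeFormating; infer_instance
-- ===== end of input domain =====

-- B fuses A's three passes into one loop over the lines (simpler, one traversal, no
-- intermediate strings); equal return value on every input where A returns (Pre_ below).

-- ===== PORT A =====

-- A's `i = 0; while i < len(l) and l[i] == ' ': i += 1; l = l[i:]` — the index
-- advance over the leading spaces followed by the slice, as one recursion.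
def aStrip : List Char → List Char
  | [] => []
  | c :: t => if c = ' ' then aStrip t else c :: t

-- A's `i = 0; while not l[i].isalpha(): i += 1` — returns the final i, or none
-- where Python raises IndexError (l[i] out of range).
def aAlphaIdx (l : List Char) (i : Nat) : Option Nat :=
  match h : PySem.List.pyGet? l (i : Int) with
  | none => none
  | some c => if PySem.Chars.isalpha c then some i else aAlphaIdx l (i + 1)
  termination_by l.length - i
  decreasing_by
    have hi : i < l.length := by
      by_contra hge
      rw [PySem.List.pyGet?_natCast, List.getElem?_eq_none (by omega)] at h
      simp at h
    omega

def removeFormating (text : String) : String :=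
  -- pass 1: remove initial white spaces and empty lines
  let newtext1 : List Char :=
    (PySem.Chars.splitlines text.toList).foldl (fun acc l =>
      if l = [] then acc
      else acc ++ (aStrip l ++ ['\n'])) []
  -- pass 2: get main items (try: int(l[0]) — bare except catches IndexError and ValueError)
  let main_items : List (List Char) :=
    (PySem.Chars.splitlines newtext1).foldl (fun acc l =>
      match PySem.List.pyGet? l (0 : Int) with
      | none => acc
      | some c =>
        match PySem.Int.ofChars? [c] with
        | some _ => acc ++ [l]
        | none => acc) []
  -- pass 3: drop the symbols, then everything before the first alphabetic char
  let newtext2 : List Char :=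
    main_items.foldl (fun acc l =>
      let l1 := [['#'], ['*'], ['='], ['-']].foldl (fun s sym => PySem.Chars.replace s sym []) l
      match aAlphaIdx l1 0 with
      | some i => acc ++ (PySem.List.slice l1 (some (i : Int)) none ++ ['\n'])
      | none => acc) []   -- none = IndexError in Python; such inputs are outside Pre_
  String.mk (PySem.List.slice newtext2 none (some (-1)))

-- ===== PORT B =====

-- B's `for k, c in enumerate(l): if c.isalpha(): out.append(l[k:]); break`:
-- the suffix of l from its first alphabetic char, none if there is none.
def bTail : List Char → Option (List Char)
  | [] => none
  | c :: t => if PySem.Chars.isalpha c then some (c :: t) else bTail t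

def removeFormating_alt (text : String) : String :=
  let out : List (List Char) :=
    (PySem.Chars.splitlines text.toList).foldl (fun acc raw =>
      let l := raw.dropWhile (fun c => c == ' ')        -- raw.lstrip(' ')
      match l with
      | [] => acc                                        -- `not l`
      | c :: _ =>
        if PySem.Chars.isdigit c then
          let l2 := l.filter (fun ch => !(ch ∈ ['#', '*', '=', '-']))  -- c not in '#*=-'
          match bTail l2 with
          | some tail => acc ++ [tail]
          | none => acc
        else acc) []
  String.mk (PySem.Chars.join ['\n'] out)                -- '\n'.join(out)

-- ===== PRECONDITION & SPEC =====

-- Pre_ excludes exactly the inputs on which A raises IndexError: a line that, after the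
-- leading spaces, starts with a digit but contains no alphabetic character.
def Pre_removeFormating (text : String) : Prop :=
  ∀ l ∈ PySem.Chars.splitlines text.toList,
    PySem.Chars.isdigit ((l.dropWhile (fun c => c == ' ')).headD 'x') = true →
    l.any PySem.Chars.isalpha = true
instance (text : String) : Decidable (Pre_removeFormating text) := by unfold Pre_removeFormating; infer_instance

def pvWitness_removeFormating : String := " 1. step one\n\n#2 = step-two\nnote\n"

def Spec_removeFormating (text : String) (out : String) : Prop := out = removeFormating_alt text
instance (text : String) (out : String) : Decidable (Spec_removeFormating text out) := by unfold Spec_removeFormating; infer_instance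

-- ===== CLAIM (what is proved, stated in full; the proofs are below) =====
def Claim_equal_removeFormating : Prop := ∀ (text : String), Dom_removeFormating text → Pre_removeFormating text → Spec_removeFormating text (removeFormating text)

-- ===== LEMMAS AND PROOFS =====

-- splitlines.go steps
lemma go_cons (isB : Char → Bool) (c : Char) (rest cur : List Char) (acc : List (List Char))
    (hc : isB c = false) (hr : c ≠ '\r') :
    PySem.Chars.splitlines.go isB (c :: rest) cur acc = PySem.Chars.splitlines.go isB rest (c :: cur) acc := by
  rw [PySem.Chars.splitlines.go.eq_def]
  rcases rest with _ | ⟨d, t⟩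
  · simp [hc]
  · by_cases h : c = '\r' <;> by_cases h2 : d = '\n' <;> simp_all

lemma go_newline (isB : Char → Bool) (rest cur : List Char) (acc : List (List Char)) (h : isB '\n' = true) :
    PySem.Chars.splitlines.go isB ('\n' :: rest) cur acc = PySem.Chars.splitlines.go isB rest [] (cur.reverse :: acc) := by
  rw [PySem.Chars.splitlines.go.eq_def]
  rcases rest with _ | ⟨d, t⟩ <;> simp [h]

lemma go_nil (isB : Char → Bool) (acc : List (List Char)) :
    PySem.Chars.splitlines.go isB [] [] acc = acc.reverse := by
  rw [PySem.Chars.splitlines.go.eq_def]; simp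

lemma go_line (isB : Char → Bool) (l : List Char) (rest cur : List Char) (acc : List (List Char))
    (h : ∀ c ∈ l, isB c = false) (hr : isB '\r' = true) :
    PySem.Chars.splitlines.go isB (l ++ rest) cur acc = PySem.Chars.splitlines.go isB rest (l.reverse ++ cur) acc := by
  induction l generalizing cur with
  | nil => simp
  | cons c t ih =>
    have hc : isB c = false := h c (by simp)
    have hcr : c ≠ '\r' := fun he => by rw [he, hr] at hc; exact Bool.noConfusion hc
    rw [List.cons_append, go_cons isB c _ _ _ hc hcr, ih _ (fun x hx => h x (by simp [hx]))]
    simp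

lemma go_flat (isB : Char → Bool) (ls : List (List Char)) (acc : List (List Char))
    (h : ∀ l ∈ ls, ∀ c ∈ l, isB c = false) (hn : isB '\n' = true) (hr : isB '\r' = true) :
    PySem.Chars.splitlines.go isB (ls.flatMap (fun l => l ++ ['\n'])) [] acc = acc.reverse ++ ls := by
  induction ls generalizing acc with
  | nil => simp [go_nil]
  | cons l ls ih =>
    rw [List.flatMap_cons, List.append_assoc,
      go_line isB l _ _ _ (h l (by simp)) hr, List.singleton_append,
      go_newline isB _ _ _ hn]
    simp only [List.append_nil, List.reverse_reverse]
    rw [ih _ (fun x hx => h x (by simp [hx]))]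
    simp

-- every char of every line produced by splitlines.go satisfies p, provided every
-- input char is a break char or satisfies p
lemma go_mem (isB : Char → Bool) (p : Char → Bool) (s cur : List Char) (acc : List (List Char))
    (hs : ∀ c ∈ s, isB c = true ∨ p c = true) (hcur : ∀ c ∈ cur, p c = true)
    (hacc : ∀ l ∈ acc, ∀ c ∈ l, p c = true) :
    ∀ l ∈ PySem.Chars.splitlines.go isB s cur acc, ∀ c ∈ l, p c = true := by
  induction s, cur, acc using PySem.Chars.splitlines.go.induct isB with
  | case1 cur acc hcur' =>
    rw [PySem.Chars.splitlines.go.eq_def]; simp only [hcur', if_true]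
    intro l hl; exact hacc l (by simpa using hl)
  | case2 cur acc hcur' =>
    rw [PySem.Chars.splitlines.go.eq_def]
    simp only [hcur', if_false, Bool.false_eq_true]
    intro l hl c hc
    simp only [List.mem_reverse, List.mem_cons] at hl
    rcases hl with h | h
    · exact hcur c (by rw [h] at hc; simpa using hc)
    · exact hacc l h c hc
  | case3 rest cur acc ih =>
    have hstep : PySem.Chars.splitlines.go isB ('\r' :: '\n' :: rest) cur acc
        = PySem.Chars.splitlines.go isB rest [] (cur.reverse :: acc) := by
      rw [PySem.Chars.splitlines.go.eq_def]
      rfl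
    rw [hstep]
    refine ih (fun c hc => hs c (by simp [hc])) (by simp) ?_
    intro l hl c hc
    rcases List.mem_cons.1 hl with h | h
    · exact hcur c (by rw [h] at hc; simpa using hc)
    · exact hacc l h c hc
  | case4 c rest cur acc hne hB ih =>
    have hstep : PySem.Chars.splitlines.go isB (c :: rest) cur acc
        = PySem.Chars.splitlines.go isB rest [] (cur.reverse :: acc) := by
      rw [PySem.Chars.splitlines.go.eq_def]
      rcases rest with _ | ⟨d, t⟩
      · simp [hB]
      · by_cases h : c = '\r' <;> by_cases h2 : d = '\n' <;> simp_all
    rw [hstep]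
    refine ih (fun x hx => hs x (by simp [hx])) (by simp) ?_
    intro l hl x hx
    rcases List.mem_cons.1 hl with h | h
    · exact hcur x (by rw [h] at hx; simpa using hx)
    · exact hacc l h x hx
  | case5 c rest cur acc hne hB ih =>
    have hstep : PySem.Chars.splitlines.go isB (c :: rest) cur acc
        = PySem.Chars.splitlines.go isB rest (c :: cur) acc := by
      rw [PySem.Chars.splitlines.go.eq_def]
      rcases rest with _ | ⟨d, t⟩
      · simp [hB]
      · by_cases h : c = '\r' <;> by_cases h2 : d = '\n' <;> simp_all
    rw [hstep]
    have hpc : p c = true := by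
      rcases hs c (by simp) with h | h
      · rw [h] at hB; exact absurd rfl hB
      · exact h
    refine ih (fun x hx => hs x (by simp [hx])) ?_ hacc
    intro x hx
    rcases List.mem_cons.1 hx with h | h
    · rw [h]; exact hpc
    · exact hcur x h


-- ===== proof-side helpers =====

-- the break-char test splitlines uses (definitionally the one inside PySem.Chars.splitlines)
def pvIsB (c : Char) : Bool :=
  c.toNat = 10 || c.toNat = 13 || c.toNat = 11 || c.toNat = 12 || c.toNat = 28 || c.toNat = 29 || c.toNat = 30 || c.toNat = 133 || c.toNat = 8232 || c.toNat = 8233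

lemma splitlines_eq_go (s : List Char) :
    PySem.Chars.splitlines s = PySem.Chars.splitlines.go pvIsB s [] [] := rfl

-- A's pass-2 keep test on a line
def pvP2 (l : List Char) : Bool :=
  match PySem.List.pyGet? l (0 : Int) with
  | none => false
  | some c => (PySem.Int.ofChars? [c]).isSome

-- A's pass-3 contribution of one main item
def pvG3 (l : List Char) : List Char :=
  let l1 := [['#'], ['*'], ['='], ['-']].foldl (fun s sym => PySem.Chars.replace s sym []) l
  match aAlphaIdx l1 0 with
  | some i => PySem.List.slice l1 (some (i : Int)) none ++ ['\n']
  | none => []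

-- B's contribution of one raw line
def pvLineOut (raw : List Char) : List (List Char) :=
  match raw.dropWhile (fun c => c == ' ') with
  | [] => []
  | c :: t =>
    if PySem.Chars.isdigit c then
      match bTail ((c :: t).filter (fun ch => !(ch ∈ ['#', '*', '=', '-']))) with
      | some tail => [tail]
      | none => []
    else []

lemma intChar (c : Char) (hdom : pvDomChar c = true) :
    (PySem.Int.ofChars? [c]).isSome = PySem.Chars.isdigit c := by
  have h127 : c.toNat < 127 := by
    unfold pvDomChar at hdom
    simp only [Bool.or_eq_true, Bool.and_eq_true, decide_eq_true_eq, beq_iff_eq] at hdom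
    omega
  have key : ∀ n < 127, (PySem.Int.ofChars? [Char.ofNat n]).isSome = PySem.Chars.isdigit (Char.ofNat n) := by decide
  have := key c.toNat h127
  rwa [Char.ofNat_toNat] at this

lemma aStrip_eq (l : List Char) : aStrip l = l.dropWhile (fun c => c == ' ') := by
  induction l with
  | nil => rfl
  | cons c t ih =>
    by_cases h : c = ' '
    · subst h; rw [List.dropWhile_cons_of_pos (by simp)]; simpa [aStrip] using ih
    · rw [List.dropWhile_cons_of_neg (by simp [h])]; simp [aStrip, h]

lemma replace_go_single (c : Char) : ∀ (fuel : Nat) (l : List Char) (acc : List Char), l.length ≤ fuel →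
    PySem.Chars.replace.go [c] [] fuel l acc = acc.reverse ++ l.filter (fun x => !(x == c)) := by
  intro fuel
  induction fuel with
  | zero => intro l acc h; rw [PySem.Chars.replace.go.eq_def]; simp_all [List.length_eq_zero_iff.1 (Nat.le_zero.1 h)]
  | succ n ih =>
    intro l acc h
    rcases l with _ | ⟨d, t⟩
    · rw [PySem.Chars.replace.go.eq_def]; simp
    · rw [PySem.Chars.replace.go.eq_def]
      by_cases hd : c = d
      · have hpre : ([c].isPrefixOf (d :: t)) = true := by simp [List.isPrefixOf, hd]
        simp only [hpre, if_true]
        have := ih t acc (by simpa using h)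
        simp only [List.length_cons, List.length_nil] at this ⊢
        simpa [hd] using this
      · have hpre : ([c].isPrefixOf (d :: t)) = false := by
          simp only [List.isPrefixOf, Bool.and_true, beq_eq_false_iff_ne, ne_eq]
          exact hd
        simp only [hpre, Bool.false_eq_true, if_false]
        rw [ih t (d :: acc) (by simpa using h)]
        have : d ≠ c := fun he => hd he.symm
        simp [this]

lemma replace_single (s : List Char) (c : Char) :
    PySem.Chars.replace s [c] [] = s.filter (fun x => !(x == c)) := by
  rw [PySem.Chars.replace]
  simp only [List.isEmpty_cons]
  exact (replace_go_single c s.length s [] le_rfl).trans (by simp)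

-- A's four sequential replaces remove exactly the four symbol chars
lemma symChain (l : List Char) :
    [['#'], ['*'], ['='], ['-']].foldl (fun s sym => PySem.Chars.replace s sym []) l
      = l.filter (fun ch => !(ch ∈ ['#', '*', '=', '-'])) := by
  simp only [List.foldl_cons, List.foldl_nil]
  rw [replace_single, replace_single, replace_single, replace_single]
  simp only [List.filter_filter]
  apply List.filter_congr
  intro x _
  by_cases h1 : x = '#' <;> by_cases h2 : x = '*' <;> by_cases h3 : x = '=' <;> by_cases h4 : x = '-' <;>
    simp_all

lemma idx_tail (l : List Char) (i : Nat) :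
    (aAlphaIdx l i).map (fun j => l.drop j) = bTail (l.drop i) := by
  induction i using aAlphaIdx.induct l with
  | case1 i h =>
    rw [aAlphaIdx, h]
    rw [PySem.List.pyGet?_natCast] at h
    have hlen : l.length ≤ i := by
      by_contra hlt
      rw [List.getElem?_eq_getElem (by omega)] at h
      simp at h
    rw [List.drop_eq_nil_of_le hlen]
    rfl
  | case2 i c h halpha =>
    rw [aAlphaIdx, h]
    rw [PySem.List.pyGet?_natCast] at h
    have hlt : i < l.length := by
      by_contra hge
      rw [List.getElem?_eq_none (by omega)] at h; simp at h
    have hc : l[i] = c := by rw [List.getElem?_eq_getElem hlt] at h; simpa using h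
    have hdrop : l.drop i = c :: l.drop (i + 1) := by rw [List.drop_eq_getElem_cons hlt, hc]
    rw [hdrop, bTail]
    simp only [halpha, if_true, Option.map_some]
    exact congrArg some hdrop
  | case3 i c h halpha ih =>
    rw [aAlphaIdx, h]
    rw [PySem.List.pyGet?_natCast] at h
    have hlt : i < l.length := by
      by_contra hge
      rw [List.getElem?_eq_none (by omega)] at h; simp at h
    have hc : l[i] = c := by rw [List.getElem?_eq_getElem hlt] at h; simpa using h
    have hdrop : l.drop i = c :: l.drop (i + 1) := by rw [List.drop_eq_getElem_cons hlt, hc]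
    rw [hdrop, bTail]
    simp only [halpha, Bool.false_eq_true, if_false]
    exact ih

lemma bTail_eq_none_iff (l : List Char) : bTail l = none ↔ l.any PySem.Chars.isalpha = false := by
  induction l with
  | nil => simp [bTail]
  | cons c t ih => by_cases h : PySem.Chars.isalpha c <;> simp [bTail, h, ih]

lemma mem_dropWhile_of_mem {l : List Char} {x : Char} (p : Char → Bool) (hx : x ∈ l) (hp : p x = false) :
    x ∈ l.dropWhile p := by
  induction l with
  | nil => simp at hx
  | cons c t ih =>
    by_cases h : p c
    · rw [List.dropWhile_cons_of_pos h]
      rcases List.mem_cons.1 hx with rfl | hxt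
      · rw [hp] at h; exact absurd h (by simp)
      · exact ih hxt
    · rw [List.dropWhile_cons_of_neg h]; exact hx

lemma flat_eq_join_concat (parts : List (List Char)) (hne : parts ≠ []) :
    parts.flatMap (fun t => t ++ ['\n']) = PySem.Chars.join ['\n'] parts ++ ['\n'] := by
  induction parts with
  | nil => exact absurd rfl hne
  | cons p ps ih =>
    rcases ps with _ | ⟨q, qs⟩
    · simp [PySem.Chars.join_singleton]
    · rw [List.flatMap_cons, ih (by simp), PySem.Chars.join_cons_cons]
      simp

lemma join_eq_dropLast_flat (parts : List (List Char)) :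
    PySem.Chars.join ['\n'] parts = (parts.flatMap (fun t => t ++ ['\n'])).dropLast := by
  rcases eq_or_ne parts [] with rfl | hne
  · simp [PySem.Chars.join_nil]
  · rw [flat_eq_join_concat parts hne, List.dropLast_concat]

lemma slice_neg_one (l : List Char) : PySem.List.slice l none (some (-1)) = l.dropLast := by
  simp [PySem.List.slice, List.dropLast_eq_take]

lemma flatMap_congr_mem {α β : Type} {l : List α} {f g : α → List β}
    (h : ∀ x ∈ l, f x = g x) : l.flatMap f = l.flatMap g := by
  simp only [List.flatMap_def]
  rw [List.map_congr_left h]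

lemma flatMap_if_eq_flatMap_filter {α β : Type} (q : α → Bool) (g : α → List β) (l : List α) :
    l.flatMap (fun x => if q x then g x else []) = (l.filter q).flatMap g := by
  induction l with
  | nil => rfl
  | cons x t ih =>
    by_cases h : q x
    · rw [List.flatMap_cons, List.filter_cons_of_pos h, List.flatMap_cons, ih]
      simp [h]
    · rw [List.flatMap_cons, List.filter_cons_of_neg (by simpa using h), ih]
      simp [h]

-- the per-line equality: A's three per-line steps agree with B's single step
lemma perLine (raw : List Char)
    (hdom : ∀ c ∈ raw, pvDomChar c = true)
    (hpre : PySem.Chars.isdigit ((raw.dropWhile (fun c => c == ' ')).headD 'x') = true →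
            raw.any PySem.Chars.isalpha = true) :
    (if (pvP2 (aStrip raw) && !raw.isEmpty) then pvG3 (aStrip raw) else [])
      = (pvLineOut raw).flatMap (fun t => t ++ ['\n']) := by
  rw [pvLineOut]
  cases hl' : raw.dropWhile (fun c => c == ' ') with
  | nil =>
    have h2 : pvP2 (aStrip raw) = false := by
      rw [aStrip_eq, hl']; rfl
    simp [h2]
  | cons c t =>
    have hraw : raw.isEmpty = false := by
      cases raw with
      | nil => simp at hl'
      | cons _ _ => rfl
    have hcmem : c ∈ raw := by
      have h' : c ∈ raw.dropWhile (fun c => c == ' ') := by rw [hl']; simp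
      exact List.Sublist.mem h' (List.dropWhile_sublist _)
    have h2 : pvP2 (aStrip raw) = PySem.Chars.isdigit c := by
      rw [pvP2, aStrip_eq, hl']
      have : PySem.List.pyGet? (c :: t) ((0 : Nat) : Int) = some c := by
        rw [PySem.List.pyGet?_natCast]; rfl
      rw [show ((0 : Int) = ((0 : Nat) : Int)) by rfl, this]
      exact intChar c (hdom c hcmem)
    rw [h2, hraw]
    simp only [Bool.not_false, Bool.and_true]
    by_cases hd : PySem.Chars.isdigit c = true
    · simp only [hd, if_true]
      rw [pvG3, symChain, aStrip_eq, hl']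
      have hany : raw.any PySem.Chars.isalpha = true := by
        apply hpre; rw [hl']; simpa using hd
      -- the alpha witness survives the space-strip and the symbol filter
      obtain ⟨a, ha, haa⟩ := List.any_eq_true.1 hany
      have hasp : (a == ' ') = false := by
        rcases Bool.eq_false_or_eq_true (a == ' ') with h' | h'
        · have : a = ' ' := by simpa using h'
          subst this; exact absurd haa (by decide)
        · exact h'
      have hal' : a ∈ c :: t := by
        rw [← hl']; exact mem_dropWhile_of_mem _ ha hasp
      have hasym : (!(a ∈ ['#', '*', '=', '-']) : Bool) = true := by
        by_cases hmem : a ∈ ['#', '*', '=', '-']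
        · fin_cases hmem <;> exact absurd haa (by decide)
        · simp [hmem]
      set l2 := (c :: t).filter (fun ch => !(ch ∈ ['#', '*', '=', '-'])) with hl2
      have hmem2 : a ∈ l2 := List.mem_filter.2 ⟨hal', hasym⟩
      have hbt : bTail l2 ≠ none := by
        intro hnone
        have h1 : l2.any PySem.Chars.isalpha = true := List.any_eq_true.2 ⟨a, hmem2, haa⟩
        rw [(bTail_eq_none_iff l2).1 hnone] at h1
        exact Bool.noConfusion h1
      cases hbt2 : bTail l2 with
      | none => exact absurd hbt2 hbt
      | some tail =>
        have := idx_tail l2 0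
        rw [List.drop_zero, hbt2] at this
        cases hix : aAlphaIdx l2 0 with
        | none => rw [hix] at this; simp at this
        | some i =>
          rw [hix] at this
          simp only [Option.map_some, Option.some_inj] at this
          show PySem.List.slice l2 (some ((i : Nat) : Int)) none ++ ['\n']
              = List.flatMap (fun t => t ++ ['\n']) [tail]
          rw [PySem.List.slice_from l2 (by omega)]
          simp [Int.toNat_natCast, this]
    · have hd' : PySem.Chars.isdigit c = false := by simpa using hd
      simp [hd']

-- ===== main proof =====
-- ===== VERDICT (by name: the statement is the Claim_ definition above) =====
theorem removeFormating_spec : Claim_equal_removeFormating := by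
  intro text hdom hpre
  unfold Spec_removeFormating
  unfold Pre_removeFormating at hpre
  have hdomc : ∀ c ∈ text.toList, pvDomChar c = true := by
    unfold Dom_removeFormating pvDomStr at hdom
    simpa [List.all_eq_true] using hdom
  have hchars : ∀ l ∈ PySem.Chars.splitlines text.toList, ∀ c ∈ l,
      pvDomChar c = true ∧ pvIsB c = false := by
    have := go_mem pvIsB (fun c => pvDomChar c && !pvIsB c) text.toList [] []
      (fun c hc => by
        by_cases hb : pvIsB c
        · exact Or.inl hb
        · exact Or.inr (by simp [hdomc c hc, hb]))
      (by intro c hc; simp at hc)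
      (by intro l hl; simp at hl)
    rw [← splitlines_eq_go] at this
    intro l hl c hc
    have h := this l hl c hc
    simp only [Bool.and_eq_true, Bool.not_eq_true'] at h
    exact h
  simp only [removeFormating, removeFormating_alt]
  apply congrArg String.mk
  set LS := PySem.Chars.splitlines text.toList with hLS
  have e1 : List.foldl (fun acc l => if l = [] then acc else acc ++ (aStrip l ++ ['\n'])) [] LS
      = List.flatMap (fun m => m ++ ['\n']) (List.map aStrip (List.filter (fun l => !l.isEmpty) LS)) := by
    rw [PySem.List.foldl_congr_mem _ _
      (fun (acc : List Char) (l : List Char) => acc ++ (if l = [] then [] else aStrip l ++ ['\n'])) _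
      (by intro acc x _; by_cases h : x = [] <;> simp [h])]
    rw [PySem.List.foldl_append_eq_flatMap]
    simp only [List.nil_append]
    have h2 : (fun (l : List Char) => if l = [] then ([] : List Char) else aStrip l ++ ['\n'])
        = (fun l => if (!l.isEmpty) then aStrip l ++ ['\n'] else []) := by
      funext l; by_cases h : l = [] <;> simp [h]
    rw [h2, flatMap_if_eq_flatMap_filter, ← List.flatMap_map aStrip (fun m => m ++ ['\n'])]
  rw [e1]
  have e2 : PySem.Chars.splitlines
        (List.flatMap (fun m => m ++ ['\n']) (List.map aStrip (List.filter (fun l => !l.isEmpty) LS)))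
      = List.map aStrip (List.filter (fun l => !l.isEmpty) LS) := by
    rw [splitlines_eq_go, go_flat pvIsB _ _
      (by
        intro l hl c hc
        simp only [List.mem_map] at hl
        obtain ⟨m, hm, rfl⟩ := hl
        have hmem : c ∈ m := by
          rw [aStrip_eq] at hc
          exact List.Sublist.mem hc (List.dropWhile_sublist _)
        exact (hchars m (List.mem_of_mem_filter hm) c hmem).2)
      (by decide) (by decide)]
    simp
  rw [e2]
  set LS1 := List.map aStrip (List.filter (fun l => !l.isEmpty) LS) with hLS1
  have e3 : List.foldl
        (fun (acc : List (List Char)) (l : List Char) =>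
          match PySem.List.pyGet? l (0 : Int) with
          | none => acc
          | some c =>
            match PySem.Int.ofChars? [c] with
            | some _ => acc ++ [l]
            | none => acc) [] LS1
      = LS1.filter pvP2 := by
    rw [PySem.List.foldl_congr_mem _ _
      (fun (acc : List (List Char)) (l : List Char) => if pvP2 l then acc ++ [l] else acc) _
      (by
        intro acc x _
        cases hg : PySem.List.pyGet? x ((0 : Int)) with
        | none => simp [pvP2, hg]
        | some c => cases ho : PySem.Int.ofChars? [c] <;> simp [pvP2, hg, ho])]
    rw [PySem.List.foldl_append_if_eq_filter]
    simp
  rw [e3]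
  have e4 : List.foldl
        (fun (acc : List Char) (l : List Char) =>
          match aAlphaIdx ([['#'], ['*'], ['='], ['-']].foldl (fun s sym => PySem.Chars.replace s sym []) l) 0 with
          | some i => acc ++ (PySem.List.slice ([['#'], ['*'], ['='], ['-']].foldl (fun s sym => PySem.Chars.replace s sym []) l) (some (i : Int)) none ++ ['\n'])
          | none => acc) [] (LS1.filter pvP2)
      = (LS1.filter pvP2).flatMap pvG3 := by
    rw [PySem.List.foldl_congr_mem _ _
      (fun (acc : List Char) (l : List Char) => acc ++ pvG3 l) _
      (by
        intro acc x _
        simp only [pvG3]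
        cases h : aAlphaIdx ([['#'], ['*'], ['='], ['-']].foldl (fun s sym => PySem.Chars.replace s sym []) x) 0 <;>
          simp)]
    rw [PySem.List.foldl_append_eq_flatMap]
    simp
  rw [e4, slice_neg_one]
  have e5 : (LS1.filter pvP2).flatMap pvG3
      = (LS.flatMap pvLineOut).flatMap (fun t => t ++ ['\n']) := by
    rw [hLS1, List.filter_map, List.flatMap_map, List.filter_filter,
      ← flatMap_if_eq_flatMap_filter]
    rw [flatMap_congr_mem (g := fun raw => (pvLineOut raw).flatMap (fun t => t ++ ['\n']))
      (by
        intro raw hraw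
        exact perLine raw (fun c hc => (hchars raw hraw c hc).1) (hpre raw hraw))]
    rw [← List.flatMap_assoc]
  rw [e5]
  have e6 : List.foldl
        (fun (acc : List (List Char)) (raw : List Char) =>
          match raw.dropWhile (fun c => c == ' ') with
          | [] => acc
          | c :: t =>
            if PySem.Chars.isdigit c then
              match bTail ((raw.dropWhile (fun c => c == ' ')).filter (fun ch => !(ch ∈ ['#', '*', '=', '-']))) with
              | some tail => acc ++ [tail]
              | none => acc
            else acc) [] LS
      = LS.flatMap pvLineOut := by
    rw [PySem.List.foldl_congr_mem _ _
      (fun (acc : List (List Char)) (raw : List Char) => acc ++ pvLineOut raw) _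
      (by
        intro acc x _
        unfold pvLineOut
        dsimp only
        cases h : x.dropWhile (fun c => c == ' ') with
        | nil => simp
        | cons c t =>
          dsimp only
          by_cases hd : PySem.Chars.isdigit c = true
          · simp only [hd, if_true]
            cases hb : bTail ((c :: t).filter (fun ch => !(ch ∈ ['#', '*', '=', '-']))) <;> simp
          · have hd2 : PySem.Chars.isdigit c = false := by simpa using hd
            simp [hd2])]
    rw [PySem.List.foldl_append_eq_flatMap]
    simp
  rw [e6, join_eq_dropLast_flat]
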